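-- pv_equiv track=rewrite | github.com/NihilDigit/anvil | scripts/eval_codec_robustness.py | compute_ref_distances
-- ===== SOURCE A (Python) =====
-- def compute_ref_distances(frame_types: list[str]) -> list[tuple[int, int]]:
--     n = len(frame_types)
--     l0_dists = []
--     last_ip_pos = 0
--     for i, ft in enumerate(frame_types):
--         if ft == "I":
--             l0_dists.append(0)
--             last_ip_pos = i
--         elif ft == "P":
--             l0_dists.append(i - last_ip_pos)
--             last_ip_pos = i
--         else:
--             l0_dists.append(i - last_ip_pos)
--
--     l1_dists = [0] * n
--     next_ip_pos = n
--     for i in range(n - 1, -1, -1):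
--         ft = frame_types[i]
--         if ft in ("I", "P"):
--             next_ip_pos = i
--         else:
--             if next_ip_pos < n:
--                 l1_dists[i] = next_ip_pos - i
--     return list(zip(l0_dists, l1_dists))
-- ===== SOURCE B (Python) =====
-- def compute_ref_distances(frame_types: list[str]) -> list[tuple[int, int]]:
--     positions = [i for i, ft in enumerate(frame_types) if ft in ("I", "P")]
--     m = len(positions)
--     out = []
--     j = 0  # number of I/P positions strictly before i
--     for i, ft in enumerate(frame_types):
--         prev = positions[j - 1] if j > 0 else 0
--         l0 = 0 if ft == "I" else i - prev
--         if ft in ("I", "P"):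
--             l1 = 0
--         else:
--             l1 = positions[j] - i if j < m else 0
--         out.append((l0, l1))
--         if j < m and positions[j] == i:
--             j += 1
--     return out
-- ===== Notes on version B (the rewrite author's own statement) =====
-- stated objective: alternative
-- what changed: Replaces A's two sweeps (a forward accumulator pass for l0 plus a backward in-place array-filling pass for l1, then zip) by precomputing the list of I/P frame positions once and emitting both distances in a single forward pass with a monotone pointer into that list.
import Mathlib
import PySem

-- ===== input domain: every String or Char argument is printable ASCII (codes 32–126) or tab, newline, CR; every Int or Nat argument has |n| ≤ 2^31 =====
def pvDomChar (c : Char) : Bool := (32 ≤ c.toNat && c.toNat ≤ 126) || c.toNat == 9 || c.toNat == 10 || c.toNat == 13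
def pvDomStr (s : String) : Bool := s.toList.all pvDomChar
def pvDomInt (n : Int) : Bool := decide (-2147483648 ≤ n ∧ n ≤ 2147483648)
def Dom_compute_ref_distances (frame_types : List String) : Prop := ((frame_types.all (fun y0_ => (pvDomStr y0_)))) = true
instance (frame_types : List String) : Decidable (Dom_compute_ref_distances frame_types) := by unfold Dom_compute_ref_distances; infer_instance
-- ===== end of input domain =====

-- B replaces A's two sweeps (forward accumulator + backward in-place array fill) by one
-- precomputed list of I/P positions consumed in a single forward pass with a monotone pointer
-- (objective: alternative single-pass decomposition; same O(n) cost).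

-- ===== PORT A =====
-- literal transliteration of A: forward pass building l0_dists with last_ip_pos,
-- then a backward pass over range(n-1, -1, -1) mutating l1_dists (List.set), then zip.
def compute_ref_distances (frame_types : List String) : List (Int × Int) :=
  let n := frame_types.length
  let r1 := (PySem.List.enumerate frame_types 0).foldl
    (fun (st : List Int × Int) (p : Int × String) =>
      if p.2 == "I" then (st.1 ++ [0], p.1)
      else if p.2 == "P" then (st.1 ++ [p.1 - st.2], p.1)
      else (st.1 ++ [p.1 - st.2], st.2))
    ([], 0)
  let r2 := (PySem.List.pyRange ((n : Int) - 1) (-1) (-1)).foldl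
    (fun (st : List Int × Int) (i : Int) =>
      -- frame_types[i]: i is always in range in this loop, so the default "" is never read
      let ft := PySem.List.pyGetD frame_types i ""
      if ft == "I" || ft == "P" then (st.1, i)
      else if st.2 < (n : Int) then (st.1.set i.toNat (st.2 - i), st.2) else st)
    (List.replicate n 0, (n : Int))
  r1.1.zip r2.1

-- ===== PORT B =====
-- literal transliteration of B: positions = indices of I/P frames; one forward pass with
-- pointer j = number of I/P positions strictly before i.
def compute_ref_distances_alt (frame_types : List String) : List (Int × Int) :=
  let positions := ((PySem.List.enumerate frame_types 0).filter
      (fun p => p.2 == "I" || p.2 == "P")).map (fun p => p.1)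
  let m := positions.length
  let r := (PySem.List.enumerate frame_types 0).foldl
    (fun (st : Nat × List (Int × Int)) (p : Int × String) =>
      -- positions[j-1] / positions[j]: only read in range, so the default 0 is never read
      let prev : Int := if 0 < st.1 then positions.getD (st.1 - 1) 0 else 0
      let l0 : Int := if p.2 == "I" then 0 else p.1 - prev
      let l1 : Int := if p.2 == "I" || p.2 == "P" then 0
        else if st.1 < m then positions.getD st.1 0 - p.1 else 0
      let j' := if st.1 < m && positions.getD st.1 0 == p.1 then st.1 + 1 else st.1
      (j', st.2 ++ [(l0, l1)]))
    (0, [])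
  r.2

-- ===== PRECONDITION & SPEC =====
def Spec_compute_ref_distances (frame_types : List String) (out : List (Int × Int)) : Prop := out = compute_ref_distances_alt frame_types
instance (frame_types : List String) (out : List (Int × Int)) : Decidable (Spec_compute_ref_distances frame_types out) := by unfold Spec_compute_ref_distances; infer_instance

-- ===== CLAIM (what is proved, stated in full; the proofs are below) =====
def Claim_equal_compute_ref_distances : Prop := ∀ (frame_types : List String), Dom_compute_ref_distances frame_types → Spec_compute_ref_distances frame_types (compute_ref_distances frame_types)

-- ===== LEMMAS AND PROOFS =====

/-- is this frame type an I/P frame (Python `ft in ("I","P")`)? -/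
def pvPred (s : String) : Bool := s == "I" || s == "P"

/-- indices (offset by `k`) of the I/P frames of a list. -/
def pvPos : List String → Nat → List Nat
  | [], _ => []
  | x :: xs, k => if pvPred x then k :: pvPos xs (k + 1) else pvPos xs (k + 1)

/-- largest I/P index strictly below `k` (A's `last_ip_pos` before step `k`). -/
def pvLast (fts : List String) : Nat → Option Nat
  | 0 => none
  | k + 1 => if pvPred (fts.getD k "") then some k else pvLast fts k

/-- smallest I/P index ≥ `k`. -/
def pvNext (fts : List String) (k : Nat) : Option Nat := (pvPos (fts.drop k) k).head?

/-- per-index specification of the first component. -/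
def pvL0 (fts : List String) (k : Nat) : Int :=
  if fts.getD k "" == "I" then 0 else (k : Int) - ((pvLast fts k).getD 0 : Nat)

/-- per-index specification of the second component. -/
def pvL1 (fts : List String) (k : Nat) : Int :=
  if pvPred (fts.getD k "") then 0
  else match pvNext fts (k + 1) with
    | some j => (j : Int) - (k : Int)
    | none => 0

theorem pvPos_append (xs ys : List String) (k : Nat) :
    pvPos (xs ++ ys) k = pvPos xs k ++ pvPos ys (k + xs.length) := by
  induction xs generalizing k with
  | nil => simp [pvPos]
  | cons x xs ih =>
      simp only [List.cons_append, pvPos, ih, List.length_cons]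
      have : k + 1 + xs.length = k + (xs.length + 1) := by omega
      rw [this]
      split <;> simp

theorem pvPos_mem_ge {xs : List String} {k x : Nat} (h : x ∈ pvPos xs k) : k ≤ x := by
  induction xs generalizing k with
  | nil => simp [pvPos] at h
  | cons y ys ih =>
      simp only [pvPos] at h
      split at h
      · rcases List.mem_cons.mp h with h' | h'
        · omega
        · have := ih h'; omega
      · have := ih h; omega

theorem pvPos_mem_lt {xs : List String} {k x : Nat} (h : x ∈ pvPos xs k) : x < k + xs.length := by
  induction xs generalizing k with
  | nil => simp [pvPos] at h
  | cons y ys ih =>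
      simp only [pvPos] at h
      split at h
      · rcases List.mem_cons.mp h with h' | h'
        · simp [h']
        · have := ih h'; simp; omega
      · have := ih h; simp; omega

theorem positions_eq (xs : List String) (k : Nat) :
    ((PySem.List.enumerate xs ((k : Nat) : Int)).filter
        (fun p => p.2 == "I" || p.2 == "P")).map (fun p => p.1)
      = (pvPos xs k).map (fun j => ((j : Nat) : Int)) := by
  induction xs generalizing k with
  | nil => simp [PySem.List.enumerate_nil, pvPos]
  | cons x xs ih =>
      rw [PySem.List.enumerate_cons]
      have hrec := ih (k + 1)
      push_cast at hrec
      cases hpp : pvPred x with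
      | true =>
          have hb : (x == "I" || x == "P") = true := hpp
          simp [pvPos, hb, hpp, hrec]
      | false =>
          have hb : (x == "I" || x == "P") = false := hpp
          simp [pvPos, hb, hpp, hrec]

theorem pvLast_eq_getLast? (fts : List String) (k : Nat) (hk : k ≤ fts.length) :
    pvLast fts k = (pvPos (fts.take k) 0).getLast? := by
  induction k with
  | zero => simp [pvLast, pvPos]
  | succ k ih =>
      have hk' : k < fts.length := by omega
      have ht : fts.take (k + 1) = fts.take k ++ [fts[k]] := by
        rw [List.take_add_one]
        simp [List.getElem?_eq_getElem hk']
      rw [ht, pvPos_append]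
      have hlen : (fts.take k).length = k := by simp; omega
      have hget : fts.getD k "" = fts[k] := List.getD_eq_getElem fts "" hk'
      simp only [pvLast, hget, hlen, Nat.zero_add, pvPos]
      by_cases hp : pvPred fts[k]
      · simp [hp]
      · simp [hp, ih (by omega)]

theorem pvNext_succ (fts : List String) (k : Nat) (hk : k < fts.length) :
    pvNext fts k = if pvPred (fts.getD k "") then some k else pvNext fts (k + 1) := by
  have hd : fts.drop k = fts[k] :: fts.drop (k + 1) := List.drop_eq_getElem_cons hk
  have hget : fts.getD k "" = fts[k] := List.getD_eq_getElem fts "" hk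
  simp only [pvNext, hd, pvPos, hget]
  split <;> simp

theorem pvNext_end (fts : List String) (k : Nat) (hk : fts.length ≤ k) :
    pvNext fts k = none := by
  simp [pvNext, List.drop_eq_nil_of_le hk, pvPos]

theorem pvNext_lt {fts : List String} {k j : Nat} (h : pvNext fts k = some j) :
    j < fts.length := by
  have hm : j ∈ pvPos (fts.drop k) k := by
    unfold pvNext at h
    exact List.mem_of_mem_head? (by simp [h])
  have h1 := pvPos_mem_lt hm
  have h2 := pvPos_mem_ge hm
  simp [List.length_drop] at h1
  omega

-- drop k = x :: rest forces k < length, x = fts[k], rest = drop (k+1)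
theorem drop_cons_facts {fts : List String} {x : String} {rest : List String} {k : Nat}
    (h : x :: rest = fts.drop k) :
    k < fts.length ∧ x = fts.getD k "" ∧ rest = fts.drop (k + 1) := by
  have hk : k < fts.length := by
    by_contra hk
    rw [List.drop_eq_nil_of_le (by omega)] at h
    simp at h
  have hd : fts.drop k = fts[k] :: fts.drop (k + 1) := List.drop_eq_getElem_cons hk
  rw [hd] at h
  have hget : fts.getD k "" = fts[k] := List.getD_eq_getElem fts "" hk
  refine ⟨hk, ?_, ?_⟩
  · rw [hget]; exact (List.cons_eq_cons.mp h).1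
  · exact (List.cons_eq_cons.mp h).2

-- ===== A, forward pass (l0) =====
theorem foldA0 (fts : List String) : ∀ (l : List String) (k : Nat) (acc : List Int),
    l = fts.drop k →
    (PySem.List.enumerate l ((k : Nat) : Int)).foldl
      (fun (st : List Int × Int) (p : Int × String) =>
        if p.2 == "I" then (st.1 ++ [0], p.1)
        else if p.2 == "P" then (st.1 ++ [p.1 - st.2], p.1)
        else (st.1 ++ [p.1 - st.2], st.2))
      (acc, (((pvLast fts k).getD 0 : Nat) : Int))
    = (acc ++ (List.range' k l.length).map (pvL0 fts),
       (((pvLast fts (k + l.length)).getD 0 : Nat) : Int)) := by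
  intro l
  induction l with
  | nil => intro k acc _; simp [PySem.List.enumerate_nil]
  | cons x rest ih =>
      intro k acc h
      obtain ⟨hk, hx, hrest⟩ := drop_cons_facts h
      have hc : ((k : Nat) : Int) + 1 = (((k + 1 : Nat) : Nat) : Int) := by push_cast; ring
      rw [PySem.List.enumerate_cons, hc]
      simp only [List.foldl_cons]
      have hlen : (x :: rest).length = rest.length + 1 := rfl
      have hidx : k + (rest.length + 1) = k + 1 + rest.length := by omega
      rw [hlen, hidx, List.range'_succ, List.map_cons]
      by_cases hI : fts.getD k "" = "I"
      · have hbI : (x == "I") = true := by rw [hx, hI]; decide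
        have hL : pvLast fts (k + 1) = some k := by
          simp only [pvLast]
          rw [hI, if_pos (by decide)]
        have step := ih (k + 1) (acc ++ [0]) hrest
        rw [hL] at step
        simp only [Option.getD_some] at step
        rw [hbI, if_pos rfl, step]
        have hL0 : pvL0 fts k = 0 := by
          unfold pvL0
          rw [hI, if_pos (by decide)]
        rw [hL0]
        simp
      · by_cases hP : fts.getD k "" = "P"
        · have hbI : (x == "I") = false := by
            rw [hx]; exact beq_eq_false_iff_ne.mpr hI
          have hbP : (x == "P") = true := by rw [hx, hP]; decide
          have hL : pvLast fts (k + 1) = some k := by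
            simp only [pvLast]
            rw [hP, if_pos (by decide)]
          have step := ih (k + 1)
            (acc ++ [((k : Nat) : Int) - (((pvLast fts k).getD 0 : Nat) : Int)]) hrest
          rw [hL] at step
          simp only [Option.getD_some] at step
          rw [hbI, if_neg (by simp), hbP, if_pos rfl, step]
          have hL0 : pvL0 fts k = ((k : Nat) : Int) - (((pvLast fts k).getD 0 : Nat) : Int) := by
            unfold pvL0
            rw [if_neg]
            intro hcon
            exact hI (eq_of_beq hcon)
          rw [hL0]
          simp
        · have hbI : (x == "I") = false := by
            rw [hx]; exact beq_eq_false_iff_ne.mpr hI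
          have hbP : (x == "P") = false := by
            rw [hx]; exact beq_eq_false_iff_ne.mpr hP
          have hL : pvLast fts (k + 1) = pvLast fts k := by
            simp only [pvLast]
            rw [if_neg]
            intro hcon
            have : pvPred (fts.getD k "") = true := hcon
            rcases Bool.or_eq_true_iff.mp this with h1 | h1
            · exact hI (eq_of_beq h1)
            · exact hP (eq_of_beq h1)
          have step := ih (k + 1)
            (acc ++ [((k : Nat) : Int) - (((pvLast fts k).getD 0 : Nat) : Int)]) hrest
          rw [hL] at step
          rw [hbI, if_neg (by simp), hbP, if_neg (by simp), step]
          have hL0 : pvL0 fts k = ((k : Nat) : Int) - (((pvLast fts k).getD 0 : Nat) : Int) := by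
            unfold pvL0
            rw [if_neg]
            intro hcon
            exact hI (eq_of_beq hcon)
          rw [hL0]
          simp

-- next I/P position as the Int A's backward loop carries (n when there is none)
def pvNextD (fts : List String) (k : Nat) : Int := (((pvNext fts k).getD fts.length : Nat) : Int)

-- ===== A, backward pass (l1) =====
theorem foldA1 (fts : List String) : ∀ (m k : Nat) (arr0 : List Int),
    k + m = fts.length → arr0.length = k →
    (List.range' k m).foldr
      (fun (i : Nat) (st : List Int × Int) =>
        let ft := PySem.List.pyGetD fts ((i : Nat) : Int) ""
        if ft == "I" || ft == "P" then (st.1, ((i : Nat) : Int))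
        else if st.2 < ((fts.length : Nat) : Int) then
          (st.1.set ((i : Nat) : Int).toNat (st.2 - ((i : Nat) : Int)), st.2)
        else st)
      (arr0 ++ List.replicate m 0, ((fts.length : Nat) : Int))
    = (arr0 ++ (List.range' k m).map (pvL1 fts), pvNextD fts k) := by
  intro m
  induction m with
  | zero =>
      intro k arr0 hk _
      have : k = fts.length := by omega
      subst this
      simp [pvNextD, pvNext_end fts fts.length (by omega)]
  | succ m ih =>
      intro k arr0 hk harr
      have hk' : k < fts.length := by omega
      have hget : fts.getD k "" = fts[k] := List.getD_eq_getElem fts "" hk'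
      have hrep : arr0 ++ List.replicate (m + 1) 0 = (arr0 ++ [(0 : Int)]) ++ List.replicate m 0 := by
        simp [List.replicate_succ]
      rw [List.range'_succ, List.foldr_cons, hrep,
          ih (k + 1) (arr0 ++ [0]) (by omega) (by simp [harr])]
      have hpg : PySem.List.pyGetD fts ((k : Nat) : Int) "" = fts.getD k "" :=
        PySem.List.pyGetD_natCast fts k ""
      simp only [hpg]
      by_cases hp : pvPred (fts.getD k "") = true
      · have hnx : pvNext fts k = some k := by rw [pvNext_succ fts k hk', if_pos hp]
        have hb : ((fts.getD k "" == "I") || (fts.getD k "" == "P")) = true := hp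
        simp only [hb]
        have hL1 : pvL1 fts k = 0 := by unfold pvL1; rw [if_pos hp]
        simp [hL1, pvNextD, hnx, List.append_assoc]
      · have hb : ((fts.getD k "" == "I") || (fts.getD k "" == "P")) = false :=
          Bool.eq_false_iff.mpr hp
        have hnx : pvNext fts k = pvNext fts (k + 1) := by
          rw [pvNext_succ fts k hk', if_neg hp]
        simp only [hb, Bool.false_eq_true, if_false]
        rcases hnxt : pvNext fts (k + 1) with _ | j
        · have hD : pvNextD fts (k + 1) = ((fts.length : Nat) : Int) := by
            simp [pvNextD, hnxt]
          have hL1 : pvL1 fts k = 0 := by unfold pvL1; rw [if_neg hp, hnxt]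
          rw [hD, if_neg (by omega)]
          simp [hL1, pvNextD, hnx, hnxt, List.append_assoc]
        · have hj : j < fts.length := pvNext_lt hnxt
          have hD : pvNextD fts (k + 1) = ((j : Nat) : Int) := by simp [pvNextD, hnxt]
          have hL1 : pvL1 fts k = ((j : Nat) : Int) - ((k : Nat) : Int) := by
            unfold pvL1; rw [if_neg hp, hnxt]
          rw [hD, if_pos (by exact_mod_cast hj)]
          have hset : ((arr0 ++ [(0 : Int)]) ++ (List.range' (k + 1) m).map (pvL1 fts)).set
                ((k : Nat) : Int).toNat (((j : Nat) : Int) - ((k : Nat) : Int))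
              = arr0 ++ (List.range' k (m + 1)).map (pvL1 fts) := by
            rw [List.range'_succ]
            have htn : ((k : Nat) : Int).toNat = k := by simp
            rw [htn, List.append_assoc]
            rw [List.set_append_right _ _ (by omega), harr]
            simp [hL1]
          rw [hset]
          simp [pvNextD, hnx, hnxt, List.range'_succ, hL1]

-- ===== B, single pass =====
theorem foldB (fts : List String) : ∀ (l : List String) (k : Nat) (acc : List (Int × Int)),
    l = fts.drop k →
    (PySem.List.enumerate l ((k : Nat) : Int)).foldl
      (fun (st : Nat × List (Int × Int)) (p : Int × String) =>
        let prev : Int := if 0 < st.1 then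
          ((pvPos fts 0).map (fun j => ((j : Nat) : Int))).getD (st.1 - 1) 0 else 0
        let l0 : Int := if p.2 == "I" then 0 else p.1 - prev
        let l1 : Int := if p.2 == "I" || p.2 == "P" then 0
          else if st.1 < ((pvPos fts 0).map (fun j => ((j : Nat) : Int))).length then
            ((pvPos fts 0).map (fun j => ((j : Nat) : Int))).getD st.1 0 - p.1 else 0
        let j' := if st.1 < ((pvPos fts 0).map (fun j => ((j : Nat) : Int))).length
            && (((pvPos fts 0).map (fun j => ((j : Nat) : Int))).getD st.1 0 == p.1)
          then st.1 + 1 else st.1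
        (j', st.2 ++ [(l0, l1)]))
      ((pvPos (fts.take k) 0).length, acc)
    = ((pvPos (fts.take (k + l.length)) 0).length,
       acc ++ (List.range' k l.length).map (fun i => (pvL0 fts i, pvL1 fts i))) := by
  intro l
  induction l with
  | nil => intro k acc _; simp [PySem.List.enumerate_nil]
  | cons x rest ih =>
      intro k acc h
      obtain ⟨hk, hx, hrest⟩ := drop_cons_facts h
      have hc : ((k : Nat) : Int) + 1 = (((k + 1 : Nat) : Nat) : Int) := by push_cast; ring
      rw [PySem.List.enumerate_cons, hc]
      simp only [List.foldl_cons]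
      have htake : fts.take (k + 1) = fts.take k ++ [fts[k]] := by
        rw [List.take_add_one]; simp [List.getElem?_eq_getElem hk]
      have hlen : (fts.take k).length = k := by simp; omega
      have hget : fts.getD k "" = fts[k] := List.getD_eq_getElem fts "" hk
      have hdk : fts.drop k = fts[k] :: fts.drop (k + 1) := List.drop_eq_getElem_cons hk
      set Fk := pvPos (fts.take k) 0 with hFk
      set Gk1 := pvPos (fts.drop (k + 1)) (k + 1) with hGk1
      have hsplit : pvPos fts 0 = Fk ++ pvPos (fts.drop k) k := by
        conv_lhs => rw [← List.take_append_drop k fts]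
        rw [pvPos_append]
        congr 2
        simp; omega
      have hGk : pvPos (fts.drop k) k
          = if pvPred fts[k] then k :: Gk1 else Gk1 := by
        rw [hdk]; simp [pvPos, hGk1]
      have hF1 : pvPos (fts.take (k + 1)) 0
          = Fk ++ (if pvPred fts[k] then [k] else []) := by
        rw [htake, pvPos_append, hlen, hFk]
        congr 1
        simp [pvPos]
      have hGge : ∀ y ∈ Gk1, k + 1 ≤ y := fun y hy => pvPos_mem_ge hy
      -- the `prev` read equals A's pvLast
      have hprev : (if 0 < Fk.length then
            ((pvPos fts 0).map (fun j => ((j : Nat) : Int))).getD (Fk.length - 1) 0 else 0)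
          = (((pvLast fts k).getD 0 : Nat) : Int) := by
        rw [pvLast_eq_getLast? fts k (by omega), ← hFk]
        rcases hFe : Fk.getLast? with _ | v
        · have hnil : Fk = [] := List.getLast?_eq_none_iff.mp hFe
          simp [hnil]
        · have hne : Fk ≠ [] := by intro hcon; rw [hcon] at hFe; simp at hFe
          have hpos : 0 < Fk.length := List.length_pos_of_ne_nil hne
          rw [if_pos hpos]
          have hidx : Fk.length - 1 < Fk.length := by omega
          have hgl : Fk[Fk.length - 1]? = some v := by
            rw [← List.getLast?_eq_getElem?]; exact hFe
          rw [hsplit, List.map_append, List.getD_append _ _ _ _ (by simp [hidx])]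
          rw [List.getD_eq_getElem?_getD, List.getElem?_map, hgl]
          simp
      by_cases hp : pvPred fts[k] = true
      · -- I or P frame at k
        have hGne : pvPos (fts.drop k) k = k :: Gk1 := by rw [hGk, if_pos hp]
        have hmlen : Fk.length < ((pvPos fts 0).map (fun j => ((j : Nat) : Int))).length := by
          rw [hsplit, hGne]; simp
        have hread : ((pvPos fts 0).map (fun j => ((j : Nat) : Int))).getD Fk.length 0
            = ((k : Nat) : Int) := by
          rw [hsplit, hGne, List.map_append,
              List.getD_append_right _ _ _ _ (by simp)]
          simp
        have hpgetd : pvPred (fts.getD k "") = true := by rw [hget]; exact hp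
        have hj' : (if Fk.length < ((pvPos fts 0).map (fun j => ((j : Nat) : Int))).length
              && (((pvPos fts 0).map (fun j => ((j : Nat) : Int))).getD Fk.length 0 == ((k : Nat) : Int))
            then Fk.length + 1 else Fk.length) = (pvPos (fts.take (k + 1)) 0).length := by
          rw [hread, if_pos (by simp only [beq_self_eq_true, Bool.and_true,
            decide_eq_true_eq]; exact hmlen), hF1, if_pos hp]
          simp
        have hxb : (x == "I" || x == "P") = true := by rw [hx, hget]; exact hp
        have hl1 : (if (x == "I" || x == "P") = true then (0 : Int)
            else if Fk.length < ((pvPos fts 0).map (fun j => ((j : Nat) : Int))).length then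
              ((pvPos fts 0).map (fun j => ((j : Nat) : Int))).getD Fk.length 0 - ((k : Nat) : Int) else 0)
            = pvL1 fts k := by
          rw [if_pos hxb]
          unfold pvL1
          rw [if_pos hpgetd]
        have hl0 : (if (x == "I") = true then (0 : Int)
              else ((k : Nat) : Int) - (if 0 < Fk.length then
                ((pvPos fts 0).map (fun j => ((j : Nat) : Int))).getD (Fk.length - 1) 0 else 0))
            = pvL0 fts k := by
          rw [hprev]
          unfold pvL0
          by_cases hI : fts[k] = "I"
          · have hbx : (x == "I") = true := by rw [hx, hget, hI]; decide
            have hbg : (fts.getD k "" == "I") = true := by rw [hget, hI]; decide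
            rw [hbx, if_pos rfl, if_pos hbg]
          · have hbx : (x == "I") = false := by
              rw [hx, hget]; exact beq_eq_false_iff_ne.mpr hI
            have hbg : ¬((fts.getD k "" == "I") = true) := by
              rw [hget]; intro hcon; exact hI (eq_of_beq hcon)
            rw [hbx, if_neg (by simp), if_neg hbg]
        rw [hj', hl0, hl1, ih (k + 1) (acc ++ [(pvL0 fts k, pvL1 fts k)]) hrest]
        simp only [List.length_cons]
        rw [List.range'_succ, List.map_cons,
            show k + 1 + rest.length = k + (rest.length + 1) from by omega]
        simp [List.append_assoc]
      · -- other frame at k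
        have hGeq : pvPos (fts.drop k) k = Gk1 := by rw [hGk, if_neg (by simp [hp])]
        have hF1' : pvPos (fts.take (k + 1)) 0 = Fk := by
          rw [hF1, if_neg (by simp [hp])]; simp
        have hI : fts[k] ≠ "I" := by
          intro hcon; apply hp; rw [hcon]; decide
        have hPne : fts[k] ≠ "P" := by
          intro hcon; apply hp; rw [hcon]; decide
        have hgp : ¬(pvPred (fts.getD k "") = true) := by rw [hget]; exact hp
        have hbI : (x == "I") = false := by
          rw [hx, hget]; exact beq_eq_false_iff_ne.mpr hI
        have hbP : (x == "P") = false := by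
          rw [hx, hget]; exact beq_eq_false_iff_ne.mpr hPne
        have hbg : ¬((fts.getD k "" == "I") = true) := by
          rw [hget]; intro hcon; exact hI (eq_of_beq hcon)
        have hnx : pvNext fts (k + 1) = Gk1.head? := by rw [pvNext, ← hGk1]
        have hl0 : (if (x == "I") = true then (0 : Int)
              else ((k : Nat) : Int) - (if 0 < Fk.length then
                ((pvPos fts 0).map (fun j => ((j : Nat) : Int))).getD (Fk.length - 1) 0 else 0))
            = pvL0 fts k := by
          rw [hprev, hbI]
          simp only [Bool.false_eq_true, if_false]
          unfold pvL0
          rw [if_neg hbg]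
        have hl1 : (if (x == "I" || x == "P") = true then (0 : Int)
            else if Fk.length < ((pvPos fts 0).map (fun j => ((j : Nat) : Int))).length then
              ((pvPos fts 0).map (fun j => ((j : Nat) : Int))).getD Fk.length 0 - ((k : Nat) : Int) else 0)
            = pvL1 fts k := by
          rw [hbI, hbP]
          simp only [Bool.false_eq_true, Bool.or_self, if_false]
          rcases hG : Gk1 with _ | ⟨g, gs⟩
          · have hnlt : ¬ Fk.length < ((pvPos fts 0).map (fun j => ((j : Nat) : Int))).length := by
              rw [hsplit, hGeq, hG]; simp
            rw [if_neg hnlt]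
            have hnone : pvNext fts (k + 1) = none := by rw [hnx, hG]; rfl
            unfold pvL1
            rw [if_neg hgp, hnone]
          · have hlt : Fk.length < ((pvPos fts 0).map (fun j => ((j : Nat) : Int))).length := by
              rw [hsplit, hGeq, hG]; simp
            rw [if_pos hlt]
            have hread : ((pvPos fts 0).map (fun j => ((j : Nat) : Int))).getD Fk.length 0
                = ((g : Nat) : Int) := by
              rw [hsplit, hGeq, hG, List.map_append,
                  List.getD_append_right _ _ _ _ (by simp)]
              simp
            rw [hread]
            have hsome : pvNext fts (k + 1) = some g := by rw [hnx, hG]; rfl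
            unfold pvL1
            rw [if_neg hgp, hsome]
        have hj' : (if Fk.length < ((pvPos fts 0).map (fun j => ((j : Nat) : Int))).length
              && (((pvPos fts 0).map (fun j => ((j : Nat) : Int))).getD Fk.length 0 == ((k : Nat) : Int))
            then Fk.length + 1 else Fk.length) = (pvPos (fts.take (k + 1)) 0).length := by
          rw [hF1']
          rcases hG : Gk1 with _ | ⟨g, gs⟩
          · rw [if_neg]
            simp [hsplit, hGeq, hG]
          · have hge : k + 1 ≤ g := hGge g (by rw [hG]; simp)
            have hread : ((pvPos fts 0).map (fun j => ((j : Nat) : Int))).getD Fk.length 0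
                = ((g : Nat) : Int) := by
              rw [hsplit, hGeq, hG, List.map_append,
                  List.getD_append_right _ _ _ _ (by simp)]
              simp
            rw [hread, if_neg]
            simp
            intro _
            omega
        rw [hj', hl0, hl1, ih (k + 1) (acc ++ [(pvL0 fts k, pvL1 fts k)]) hrest]
        simp only [List.length_cons]
        rw [List.range'_succ, List.map_cons,
            show k + 1 + rest.length = k + (rest.length + 1) from by omega]
        simp [List.append_assoc]

theorem A_eq (fts : List String) :
    compute_ref_distances fts
      = (List.range' 0 fts.length).map (fun k => (pvL0 fts k, pvL1 fts k)) := by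
  unfold compute_ref_distances
  simp only
  have h0 := foldA0 fts fts 0 [] (by simp)
  simp only [Nat.cast_zero, pvLast, Option.getD_none, List.nil_append, Nat.zero_add] at h0
  rw [h0]
  have hrange : PySem.List.pyRange ((fts.length : Int) - 1) (-1) (-1)
      = ((List.range fts.length).map (fun k => ((k : Nat) : Int))).reverse := by
    rw [PySem.List.pyRange_neg_one_eq_reverse]
    norm_num
    rw [PySem.List.pyRange_zero_nat]
  rw [hrange, ← List.map_reverse, List.foldl_map, List.foldl_reverse]
  have h1 := foldA1 fts fts.length 0 [] (by omega) rfl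
  simp only [List.nil_append, List.range_eq_range'] at h1 ⊢
  rw [h1]
  simp [List.zip_map']

theorem B_eq (fts : List String) :
    compute_ref_distances_alt fts
      = (List.range' 0 fts.length).map (fun k => (pvL0 fts k, pvL1 fts k)) := by
  unfold compute_ref_distances_alt
  simp only
  have hpos := positions_eq fts 0
  simp only [Nat.cast_zero] at hpos
  rw [hpos]
  have h := foldB fts fts 0 [] (by simp)
  simp only [Nat.cast_zero, List.take_zero, pvPos, List.length_nil, List.nil_append,
    Nat.zero_add] at h
  rw [h]

-- ===== VERDICT (by name: the statement is the Claim_ definition above) =====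
theorem compute_ref_distances_spec : Claim_equal_compute_ref_distances := by
  intro fts _
  unfold Spec_compute_ref_distances
  rw [A_eq, B_eq]
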